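-- pv_equiv track=rewrite | github.com/MrRoolade/Epreuve_Feu | Feu04.py | display_pattern_in_board
-- ===== SOURCE A (Python) =====
-- def replace_car_in_square(square, full_car):
--     for line in square:
--         for i in range(len(line)):
--             line[i] = full_car
--     return square
--
-- def display_pattern_in_board(board,square,x,y):
--
--     if x is not None and y is not None:
--         new_square = replace_car_in_square(square, "o")
--         display = []
--         for yb, row in enumerate(board):
--             line = []
--             for xb, _ in enumerate(row):
--                 # Vérifie si la position (x, y) se trouve dans la zone où le motif doit être affiché
--                 x_pattern =  x <= xb < x + max(len(row) for row in new_square)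
--                 y_pattern =  y <= yb < y + len(new_square)
--
--                 # Calcule les coordonnées relatives du motif par rapport au coin supérieur gauche du square
--                 if x_pattern and y_pattern :
--                     yp = yb - y
--                     xp = xb - x
--
--                     # Vérifie si la position se trouve dans les limites du motif et récupère le caractère correspondant
--                     if yp < len(new_square) and xp < len(new_square[yp]) :
--                         line.append(new_square[yp][xp])
--                     else:
--                         line.append(board[yb][xb])
--                 else:
--                     line.append(board[yb][xb])
--
--             line = "".join(line)
--             display.append(line)
--         display = "\n".join(display)
--         return display
--     else:
--         return "carré non trouvé"
-- ===== SOURCE B (Python) =====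
-- def replace_car_in_square(square, full_car):
--     for line in square:
--         for i in range(len(line)):
--             line[i] = full_car
--     return square
--
-- def _stamp(display, r, c):
--     # write "o" at (r, c) if that cell exists on the board
--     if 0 <= r < len(display) and 0 <= c < len(display[r]):
--         display[r][c] = "o"
--
-- def display_pattern_in_board(board, square, x, y):
--     if x is None or y is None:
--         return "carré non trouvé"
--     new_square = replace_car_in_square(square, "o")
--     # iterate the (small) pattern and stamp into a copy of the board,
--     # instead of scanning every board cell and testing region membership
--     positions = [(y + yp, x + xp)
--                  for yp, prow in enumerate(new_square)
--                  for xp, _ in enumerate(prow)]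
--     display = [list(row) for row in board]
--     for r, c in positions:
--         _stamp(display, r, c)
--     return "\n".join("".join(r) for r in display)
-- ===== Notes on version B (the rewrite author's own statement) =====
-- stated objective: alternative
-- what changed: Instead of scanning every board cell and testing region membership (re-evaluating the max pattern-row width per cell), B stamps 'o' into a copy of the board at each pattern position and joins the result.
import Mathlib
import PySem

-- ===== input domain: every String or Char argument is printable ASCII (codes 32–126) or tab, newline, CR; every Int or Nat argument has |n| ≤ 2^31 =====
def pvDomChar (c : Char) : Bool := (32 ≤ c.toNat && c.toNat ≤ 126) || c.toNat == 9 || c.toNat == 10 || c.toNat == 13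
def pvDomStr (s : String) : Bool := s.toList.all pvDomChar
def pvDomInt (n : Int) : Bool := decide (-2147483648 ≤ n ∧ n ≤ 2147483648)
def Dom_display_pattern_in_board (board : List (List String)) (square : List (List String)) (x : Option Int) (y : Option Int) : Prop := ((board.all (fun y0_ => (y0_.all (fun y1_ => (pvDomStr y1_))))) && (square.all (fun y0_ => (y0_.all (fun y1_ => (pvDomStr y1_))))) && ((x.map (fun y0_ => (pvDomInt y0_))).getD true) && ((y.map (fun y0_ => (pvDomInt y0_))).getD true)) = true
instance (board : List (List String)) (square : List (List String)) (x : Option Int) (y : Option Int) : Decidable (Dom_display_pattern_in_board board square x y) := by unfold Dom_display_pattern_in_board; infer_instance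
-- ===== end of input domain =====

-- B replaces A's per-cell region test over the whole board by stamping the pattern's cells into a
-- copy of the board; A mutates `square` in place (all cells become "o") and B performs the same
-- mutation in Python — the equivalence proved here is about the return value.

-- ===== PORT A =====
def display_pattern_in_board (board : List (List String)) (square : List (List String)) (x : Option Int) (y : Option Int) : String :=
  match x, y with
  | some xv, some yv =>
    let ns := square.map (fun line => line.map (fun _ => "o"))
    let disp := (PySem.List.enumerate board).map (fun p =>
      let cells := (PySem.List.enumerate p.2).map (fun q =>
        -- Python's max() raises ValueError when ns = [] and this cell exists; Pre_ excludes that,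
        -- the port totalises it with getD 0
        let maxw : Int := ((PySem.List.max? (ns.map (fun r => (List.length r : Int))) (fun v => v)).getD 0)
        if (xv ≤ q.1 ∧ q.1 < xv + maxw) ∧ (yv ≤ p.1 ∧ p.1 < yv + (ns.length : Int)) then
          let yp := p.1 - yv
          let xp := q.1 - xv
          if yp < (ns.length : Int) ∧ xp < ((PySem.List.pyGetD ns yp ([] : List String)).length : Int) then
            PySem.List.pyGetD (PySem.List.pyGetD ns yp []) xp ""
          else q.2
        else q.2)
      PySem.Str.join "" cells)
    PySem.Str.join "\n" disp
  | _, _ => "carré non trouvé"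

-- ===== PORT B =====
-- Source B's helper _stamp: write "o" at (r, c) if that cell exists
def pvStamp (d : List (List String)) (r c : Int) : List (List String) :=
  if 0 ≤ r ∧ r < (d.length : Int) ∧ 0 ≤ c ∧ c < ((PySem.List.pyGetD d r []).length : Int) then
    d.set r.toNat ((PySem.List.pyGetD d r []).set c.toNat "o")
  else d

def display_pattern_in_board_alt (board : List (List String)) (square : List (List String)) (x : Option Int) (y : Option Int) : String :=
  match x with
  | none => "carré non trouvé"
  | some xv =>
    match y with
    | none => "carré non trouvé"
    | some yv =>
      let ns := square.map (fun line => line.map (fun _ => "o"))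
      let positions := (PySem.List.enumerate ns).flatMap (fun p =>
        (PySem.List.enumerate p.2).map (fun q => (yv + p.1, xv + q.1)))
      let disp := positions.foldl (fun d rc => pvStamp d rc.1 rc.2) board
      PySem.Str.join "\n" (disp.map (fun r => PySem.Str.join "" r))

-- ===== PRECONDITION & SPEC =====
-- Pre_ excludes exactly the inputs where Python A raises ValueError (max() over an empty
-- sequence): x and y given, square empty, and some board row having a cell index xb with x <= xb
-- (the chained comparison "x <= xb < x + max(...)" only evaluates max() when x <= xb holds).
def Pre_display_pattern_in_board (board : List (List String)) (square : List (List String)) (x : Option Int) (y : Option Int) : Prop :=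
  x = none ∨ y = none ∨ square ≠ [] ∨ ∀ row ∈ board, row.isEmpty = true ∨ (row.length : Int) ≤ x.getD 0
instance (board : List (List String)) (square : List (List String)) (x : Option Int) (y : Option Int) : Decidable (Pre_display_pattern_in_board board square x y) := by unfold Pre_display_pattern_in_board; infer_instance
def pvWitness_display_pattern_in_board : List (List String) × List (List String) × Option Int × Option Int :=
  ([["a", "b"], ["c", "d"]], [["x"]], some 0, some 0)

def Spec_display_pattern_in_board (board : List (List String)) (square : List (List String)) (x : Option Int) (y : Option Int) (out : String) : Prop := out = display_pattern_in_board_alt board square x y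
instance (board : List (List String)) (square : List (List String)) (x : Option Int) (y : Option Int) (out : String) : Decidable (Spec_display_pattern_in_board board square x y out) := by unfold Spec_display_pattern_in_board; infer_instance

-- ===== CLAIM (what is proved, stated in full; the proofs are below) =====
def Claim_equal_display_pattern_in_board : Prop := ∀ (board : List (List String)) (square : List (List String)) (x : Option Int) (y : Option Int), Dom_display_pattern_in_board board square x y → Pre_display_pattern_in_board board square x y → Spec_display_pattern_in_board board square x y (display_pattern_in_board board square x y)

-- ===== LEMMAS AND PROOFS =====

def pvCell (d : List (List String)) (i j : Nat) : String := (d.getD i []).getD j ""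

theorem pvStamp_length (d : List (List String)) (r c : Int) : (pvStamp d r c).length = d.length := by
  unfold pvStamp; split <;> simp

theorem pvStamp_rowlen (d : List (List String)) (r c : Int) (i : Nat) :
    ((pvStamp d r c).getD i []).length = (d.getD i []).length := by
  unfold pvStamp
  split_ifs with h
  · rw [PySem.List.pyGetD_of_nonneg d [] h.1]
    simp [List.getD_eq_getElem?_getD, List.getElem?_set]
    split_ifs <;> simp_all
  · rfl

theorem pvStamp_cell (d : List (List String)) (r c : Int) (i j : Nat)
    (hi : i < d.length) (hj : j < (d.getD i []).length) :
    pvCell (pvStamp d r c) i j = if r = (i : Int) ∧ c = (j : Int) then "o" else pvCell d i j := by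
  unfold pvStamp pvCell
  split_ifs with h h2 h2
  · obtain ⟨hri, hcj⟩ := h2
    rw [PySem.List.pyGetD_of_nonneg d [] h.1]
    have hr : r.toNat = i := by omega
    have hc : c.toNat = j := by omega
    subst hr; subst hc
    have hj' : c.toNat < d[r.toNat].length := by rwa [List.getD_eq_getElem] at hj
    simp [List.getD_eq_getElem?_getD, hi, hj']
  · rw [PySem.List.pyGetD_of_nonneg d [] h.1]
    by_cases hri : r.toNat = i
    · have hr : r = (i : Int) := by omega
      have hc : ¬ c = (j : Int) := by tauto
      have hcj : c.toNat ≠ j := by omega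
      subst hri
      simp [List.getD_eq_getElem?_getD, hi, hcj]
    · simp [List.getD_eq_getElem?_getD, hri]
  · exfalso
    obtain ⟨hri, hcj⟩ := h2
    apply h
    refine ⟨by omega, by omega, by omega, ?_⟩
    rw [PySem.List.pyGetD_of_nonneg d [] (by omega : (0:Int) ≤ r)]
    have hr : r.toNat = i := by omega
    rw [hr]
    omega
  · rfl

theorem pvFold_length (ps : List (Int × Int)) (d : List (List String)) :
    (ps.foldl (fun d rc => pvStamp d rc.1 rc.2) d).length = d.length := by
  induction ps generalizing d with
  | nil => rfl
  | cons p ps ih => simp [List.foldl_cons, ih, pvStamp_length]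

theorem pvFold_rowlen (ps : List (Int × Int)) (d : List (List String)) (i : Nat) :
    ((ps.foldl (fun d rc => pvStamp d rc.1 rc.2) d).getD i []).length = (d.getD i []).length := by
  induction ps generalizing d with
  | nil => rfl
  | cons p ps ih => rw [List.foldl_cons, ih, pvStamp_rowlen]

theorem pvFold_cell (ps : List (Int × Int)) (d : List (List String)) (i j : Nat)
    (hi : i < d.length) (hj : j < (d.getD i []).length) :
    pvCell (ps.foldl (fun d rc => pvStamp d rc.1 rc.2) d) i j =
      if ((i : Int), (j : Int)) ∈ ps then "o" else pvCell d i j := by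
  induction ps generalizing d with
  | nil => simp
  | cons p ps ih =>
    rw [List.foldl_cons]
    rw [ih (pvStamp d p.1 p.2) (by rw [pvStamp_length]; exact hi) (by rw [pvStamp_rowlen]; exact hj)]
    rw [pvStamp_cell d p.1 p.2 i j hi hj]
    by_cases h1 : ((i : Int), (j : Int)) ∈ ps <;> by_cases h2 : p.1 = (i : Int) ∧ p.2 = (j : Int) <;>
      simp [h1, h2, List.mem_cons, Prod.ext_iff] <;> tauto


theorem pv_maxw_ge (ns : List (List String)) (k : Nat) (hk : k < ns.length) :
    ((ns[k]).length : Int) ≤ (PySem.List.max? (ns.map (fun r => (List.length r : Int))) (fun v => v)).getD 0 := by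
  cases h : PySem.List.max? (ns.map (fun r => (List.length r : Int))) (fun v => v) with
  | none =>
    rw [PySem.List.max?_eq_none_iff, List.map_eq_nil_iff] at h
    subst h
    simp at hk
  | some M =>
    have := PySem.List.max?_isMax h ((ns[k]).length : Int) (by exact List.mem_map.mpr ⟨ns[k], List.getElem_mem hk, rfl⟩)
    simpa using this

theorem pv_mem_positions (ns : List (List String)) (xv yv r c : Int) :
    ((r, c) ∈ (PySem.List.enumerate ns).flatMap (fun p =>
        (PySem.List.enumerate p.2).map (fun q => (yv + p.1, xv + q.1)))) ↔
    ∃ (k : Nat), ∃ (hk : k < ns.length), ∃ (m : Nat), m < ns[k].length ∧ r = yv + k ∧ c = xv + m := by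
  simp only [List.mem_flatMap, List.mem_map, PySem.List.mem_enumerate_iff, Prod.ext_iff]
  constructor
  · rintro ⟨p, ⟨k, hk, hp1, hp2⟩, q, ⟨m, hm, hq1, hq2⟩, h1, h2⟩
    refine ⟨k, hk, m, ?_, ?_, ?_⟩
    · rw [← hp2]; exact hm
    · omega
    · omega
  · rintro ⟨k, hk, m, hm, rfl, rfl⟩
    refine ⟨(↑k, ns[k]), ⟨k, hk, by simp, rfl⟩, (↑m, ns[k][m]), ⟨m, hm, by simp, rfl⟩, by simp, by simp⟩

theorem pv_Acell (ns : List (List String))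
    (hns : ∀ (k : Nat) (hk : k < ns.length) (m : Nat) (hm : m < ns[k].length), ns[k][m] = "o")
    (xv yv : Int) (i j : Nat) (cdef : String) :
    (if (xv ≤ (j : Int) ∧ (j : Int) < xv + (PySem.List.max? (ns.map (fun r => (List.length r : Int))) (fun v => v)).getD 0) ∧
        (yv ≤ (i : Int) ∧ (i : Int) < yv + (ns.length : Int)) then
       if (i : Int) - yv < (ns.length : Int) ∧ (j : Int) - xv < ((PySem.List.pyGetD ns ((i : Int) - yv) ([] : List String)).length : Int) then
         PySem.List.pyGetD (PySem.List.pyGetD ns ((i : Int) - yv) []) ((j : Int) - xv) ""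
       else cdef
     else cdef)
    = if (((i : Int), (j : Int)) ∈ (PySem.List.enumerate ns).flatMap (fun p =>
        (PySem.List.enumerate p.2).map (fun q => (yv + p.1, xv + q.1)))) then "o" else cdef := by
  by_cases hex : ∃ (k : Nat), ∃ (hk : k < ns.length), ∃ (m : Nat), m < ns[k].length ∧ (i : Int) = yv + k ∧ (j : Int) = xv + m
  · rw [if_pos ((pv_mem_positions ns xv yv i j).mpr hex)]
    obtain ⟨k, hk, m, hm, hik, hjm⟩ := hex
    have hget : PySem.List.pyGetD ns ((i : Int) - yv) [] = ns[k] := by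
      rw [PySem.List.pyGetD_of_nonneg ns [] (by omega)]
      have : ((i : Int) - yv).toNat = k := by omega
      rw [this, List.getD_eq_getElem ns [] hk]
    have houter : (xv ≤ (j : Int) ∧ (j : Int) < xv + (PySem.List.max? (ns.map (fun r => (List.length r : Int))) (fun v => v)).getD 0) ∧
        (yv ≤ (i : Int) ∧ (i : Int) < yv + (ns.length : Int)) := by
      have := pv_maxw_ge ns k hk
      refine ⟨⟨by omega, by omega⟩, by omega, by omega⟩
    rw [if_pos houter]
    rw [if_pos (by rw [hget]; constructor <;> omega)]
    rw [hget, PySem.List.pyGetD_of_nonneg ns[k] "" (by omega)]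
    have : ((j : Int) - xv).toNat = m := by omega
    rw [this, List.getD_eq_getElem ns[k] "" hm]
    exact hns k hk m hm
  · rw [if_neg (fun hmem => hex ((pv_mem_positions ns xv yv i j).mp hmem))]
    split_ifs with h1 h2
    · exfalso
      apply hex
      refine ⟨((i : Int) - yv).toNat, by omega, ((j : Int) - xv).toNat, ?_, by omega, by omega⟩
      have hget : PySem.List.pyGetD ns ((i : Int) - yv) [] = ns[((i : Int) - yv).toNat] := by
        rw [PySem.List.pyGetD_of_nonneg ns [] (by omega)]
        exact List.getD_eq_getElem ns [] (by omega)
      rw [hget] at h2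
      omega
    · rfl
    · rfl

theorem pv_cell_eq (d : List (List String)) (n m : Nat) (h1 : n < d.length) (h2 : m < d[n].length) :
    pvCell d n m = d[n][m] := by
  unfold pvCell
  rw [List.getD_eq_getElem d [] h1, List.getD_eq_getElem d[n] "" h2]

-- ===== VERDICT (by name: the statement is the Claim_ definition above) =====
theorem display_pattern_in_board_spec : Claim_equal_display_pattern_in_board := by
  intro board square x y _ _
  unfold Spec_display_pattern_in_board
  match x, y with
  | none, none => rfl
  | none, some _ => rfl
  | some _, none => rfl
  | some xv, some yv =>
    unfold display_pattern_in_board display_pattern_in_board_alt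
    dsimp only
    refine congrArg (PySem.Str.join "\n") ?_
    apply List.ext_getElem
    · simp [PySem.List.length_enumerate, pvFold_length]
    · intro n h1 h2
      simp only [List.getElem_map, PySem.List.getElem_enumerate, zero_add]
      have hbn : n < board.length := by simpa [PySem.List.length_enumerate] using h1
      have hns : ∀ (k : Nat) (hk : k < (List.map (fun line => List.map (fun _ => "o") line) square).length)
          (m : Nat) (hm : m < ((List.map (fun line => List.map (fun _ => "o") line) square)[k]).length),
          ((List.map (fun line => List.map (fun _ => "o") line) square)[k])[m] = "o" := by
        intro k hk m hm
        simp
      set ns := List.map (fun line => List.map (fun _ => "o") line) square with hnsdef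
      set pos := (PySem.List.enumerate ns).flatMap (fun p =>
        (PySem.List.enumerate p.2).map (fun q => (yv + p.1, xv + q.1))) with hposdef
      set fold := pos.foldl (fun d rc => pvStamp d rc.1 rc.2) board with hfolddef
      have hfl : fold.length = board.length := pvFold_length pos board
      have h2f : n < fold.length := by omega
      refine congrArg (PySem.Str.join "") ?_
      apply List.ext_getElem
      · rw [List.length_map, PySem.List.length_enumerate,
          ← List.getD_eq_getElem fold [] h2f, pvFold_rowlen, List.getD_eq_getElem board [] hbn]
      · intro m hm1 hm2
        have hbm : m < board[n].length := by
          simpa [PySem.List.length_enumerate] using hm1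
        have hgm : m < (board.getD n []).length := by
          rwa [List.getD_eq_getElem board [] hbn]
        simp only [List.getElem_map, PySem.List.getElem_enumerate, zero_add]
        rw [pv_Acell ns hns xv yv n m (board[n][m])]
        rw [← pv_cell_eq fold n m h2f hm2]
        rw [pvFold_cell pos board n m hbn hgm]
        rw [pv_cell_eq board n m hbn hbm]
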